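-- pv_equiv track=rewrite | github.com/shivam529/Elements-of-AI-1 | part1/solver16.py | mandist
-- ===== SOURCE A (Python) =====
-- def mandist(board, a):
--     b = 0
--     count = 0
--     while(sorted(board)[b] != board[a]):
--         b += 1
--
--     a_row = a//4
--     a_col = a % 4
--     b_row = b//4
--     b_col = b % 4
--     row_d = abs(a_row-b_row)
--     col_d = abs(a_col-b_col)
--     man_dist = min(row_d, 4-row_d)+min(col_d, 4-col_d)
--     return man_dist
-- ===== SOURCE B (Python) =====
-- def _axis(p, q):
--     d = abs(p - q)
--     return min(d, 4 - d)
--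
-- def mandist(board, a):
--     v = board[a]
--     b = sum(x < v for x in board)
--     (ar, ac), (br, bc) = divmod(a, 4), divmod(b, 4)
--     return _axis(ar, br) + _axis(ac, bc)
-- ===== Notes on version B (the rewrite author's own statement) =====
-- stated objective: faster
-- what changed: B replaces A's while loop that re-sorts the board on every iteration with a one-pass rank count (number of entries strictly less than board[a]) and restructures the arithmetic as divmod plus a per-axis toroidal-distance helper.
import Mathlib
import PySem

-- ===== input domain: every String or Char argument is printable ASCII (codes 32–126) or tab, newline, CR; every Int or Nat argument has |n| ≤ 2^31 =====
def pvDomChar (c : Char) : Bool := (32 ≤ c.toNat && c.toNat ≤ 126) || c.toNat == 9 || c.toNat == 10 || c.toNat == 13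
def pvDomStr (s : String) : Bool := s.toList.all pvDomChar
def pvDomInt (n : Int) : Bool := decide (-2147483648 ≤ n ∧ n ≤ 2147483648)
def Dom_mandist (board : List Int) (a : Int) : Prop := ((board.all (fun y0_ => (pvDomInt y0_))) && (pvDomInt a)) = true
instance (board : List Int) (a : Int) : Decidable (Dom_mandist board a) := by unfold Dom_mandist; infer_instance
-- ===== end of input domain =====

-- B replaces A's repeated-sort-and-scan search for b with a one-pass strictly-less-than rank count
-- and a per-axis toroidal-distance helper (faster, in a timing run's asymptotic label).

-- ===== PORT A =====
-- the while loop 'while sorted(board)[b] != board[a]: b += 1', scanning the sorted list from the front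
def mandistLoopA (s : List Int) (v : Int) : Nat :=
  match s with
  | [] => 0
  | x :: xs => if x = v then 0 else mandistLoopA xs v + 1

def mandist (board : List Int) (a : Int) : Int :=
  let v := PySem.List.pyGetD board a 0        -- board[a]; Pre_ guarantees the index is in range
  let b : Int := (mandistLoopA (PySem.List.sorted board (fun x => x) false) v : Nat)
  let a_row := PySem.Int.floordiv a 4
  let a_col := PySem.Int.mod a 4
  let b_row := PySem.Int.floordiv b 4
  let b_col := PySem.Int.mod b 4
  let row_d := |a_row - b_row|
  let col_d := |a_col - b_col|
  min row_d (4 - row_d) + min col_d (4 - col_d)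

-- ===== PORT B =====
-- helper _axis(p, q): toroidal distance along one axis of the 4-wide board
def mandistAxis (p q : Int) : Int :=
  let d := |p - q|
  min d (4 - d)

def mandist_alt (board : List Int) (a : Int) : Int :=
  let v := PySem.List.pyGetD board a 0                           -- board[a]
  let b : Int := (board.countP (fun x => decide (x < v)) : Nat)  -- sum(x < v for x in board)
  let pa := (PySem.Int.divmod? a 4).getD (0, 0)                  -- divmod(a, 4); divisor 4 ≠ 0
  let pb := (PySem.Int.divmod? b 4).getD (0, 0)                  -- divmod(b, 4)
  mandistAxis pa.1 pb.1 + mandistAxis pa.2 pb.2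

-- ===== PRECONDITION & SPEC =====
-- Pre_ excludes exactly the inputs where board[a] raises IndexError in Python A (and in B).
def Pre_mandist (board : List Int) (a : Int) : Prop := PySem.Raise.InRange board.length a
instance (board : List Int) (a : Int) : Decidable (Pre_mandist board a) := by unfold Pre_mandist; infer_instance
def pvWitness_mandist : List Int × Int := ([3, 1, 2, 1], 1)

def Spec_mandist (board : List Int) (a : Int) (out : Int) : Prop := out = mandist_alt board a
instance (board : List Int) (a : Int) (out : Int) : Decidable (Spec_mandist board a out) := by unfold Spec_mandist; infer_instance

-- ===== CLAIM (what is proved, stated in full; the proofs are below) =====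
def Claim_equal_mandist : Prop := ∀ (board : List Int) (a : Int), Dom_mandist board a → Pre_mandist board a → Spec_mandist board a (mandist board a)

-- ===== LEMMAS AND PROOFS =====

theorem pydivmod_four (a : Int) :
    PySem.Int.divmod? a 4 = some (PySem.Int.floordiv a 4, PySem.Int.mod a 4) := by
  simp [PySem.Int.divmod?, Int.fdiv_eq_ediv, Int.fmod_eq_emod]

-- In a sorted list containing v, the first index holding v equals the number of elements < v.
theorem mandistLoopA_eq_countP (s : List Int) (v : Int)
    (hs : s.Pairwise (· ≤ ·)) (hv : v ∈ s) :
    mandistLoopA s v = s.countP (fun x => decide (x < v)) := by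
  induction s with
  | nil => cases hv
  | cons x xs ih =>
    rcases List.pairwise_cons.1 hs with ⟨hx, hxs⟩
    by_cases hxv : x = v
    · subst hxv
      have hzero : xs.countP (fun y => decide (y < x)) = 0 := by
        apply List.countP_eq_zero.2
        intro y hy
        simpa using not_lt.2 (hx y hy)
      simp [mandistLoopA, hzero]
    · have hvxs : v ∈ xs := by
        rcases List.mem_cons.1 hv with h | h
        · exact absurd h.symm hxv
        · exact h
      have hxlt : x < v := lt_of_le_of_ne (hx v hvxs) hxv
      simp [mandistLoopA, hxv, hxlt, ih hxs hvxs]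

-- ===== VERDICT (by name: the statement is the Claim_ definition above) =====
theorem mandist_spec : Claim_equal_mandist := by
  intro board a _ hpre
  unfold Spec_mandist mandist mandist_alt mandistAxis
  have hv : PySem.List.pyGetD board a 0 ∈ board := PySem.List.pyGetD_mem board 0 hpre
  have hperm : (PySem.List.sorted board (fun x => x) false).Perm board :=
    PySem.List.sorted_perm board (fun x => x) false
  have hcount :
      mandistLoopA (PySem.List.sorted board (fun x => x) false) (PySem.List.pyGetD board a 0)
        = board.countP (fun x => decide (x < PySem.List.pyGetD board a 0)) := by
    rw [mandistLoopA_eq_countP _ _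
        (by simpa using PySem.List.sorted_pairwise board (fun x => x))
        (((PySem.List.mem_sorted _ _ _ _).2 hv))]
    exact hperm.countP_eq _
  simp only [hcount, pydivmod_four, Option.getD_some]
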